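-- pv_equiv track=rewrite | github.com/NahinM/CSE331 | Checkers/python/package/CheckerFuns/checkerFun_kkp_Fall25.py | question23a
-- ===== SOURCE A (Python) =====
-- def question23a(L:str) -> bool:
--     i = 0
--     while i<len(L) and L[i]=='1': i+=1
--     one = 0
--     while i<len(L):
--         if L[i]=='0': one = 0
--         else: one+=1
--         i+=1
--         if i<len(L) and L[i]=='0' and one%3==0: return True
--     return False
-- ===== SOURCE B (Python) =====
-- def question23a(L: str) -> bool:
--     segs = L.lstrip('1').split('0')[:-1]
--     if segs and segs[0] == '':
--         segs = segs[1:]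
--     return any(len(s) % 3 == 0 for s in segs)
-- ===== Notes on version B (the rewrite author's own statement) =====
-- stated objective: idiomatic
-- what changed: Replaces A's two index-walking while loops with a running modular counter by an lstrip of leading ones, a split on zeros, and an any() over segment lengths mod 3 (dropping the trailing segment and a leading empty segment); the str built-ins also make it measurably faster.
import Mathlib
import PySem

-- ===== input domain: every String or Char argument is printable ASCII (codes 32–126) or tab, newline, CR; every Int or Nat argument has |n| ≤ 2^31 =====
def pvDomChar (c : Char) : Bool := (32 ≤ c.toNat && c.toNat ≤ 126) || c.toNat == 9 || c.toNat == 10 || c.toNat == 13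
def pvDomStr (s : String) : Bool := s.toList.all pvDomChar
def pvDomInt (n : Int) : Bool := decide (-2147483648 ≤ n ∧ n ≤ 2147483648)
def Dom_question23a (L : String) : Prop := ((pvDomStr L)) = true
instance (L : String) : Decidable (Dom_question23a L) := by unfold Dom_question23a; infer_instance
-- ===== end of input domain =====

-- B replaces A's index walk with a running modular counter by lstrip('1') + split('0') and a
-- length-mod-3 test on the segments (objective: idiomatic; measured faster in a timing run via str built-ins).

-- ===== PORT A =====
-- first while loop: skip leading '1' characters
def q23aSkip : List Char → List Char
  | [] => []
  | c :: rest => if c = '1' then q23aSkip rest else c :: rest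

-- second while loop: state = remaining characters (the suffix from index i) and the counter `one`;
-- after consuming a character it peeks at the next (i < len(L) and L[i]=='0' and one%3==0);
-- with no next character the while condition fails and the function returns False
def q23aLoop : List Char → Nat → Bool
  | [], _ => false
  | c :: rest, one =>
    let one' := if c = '0' then 0 else one + 1
    match rest with
    | [] => false
    | d :: _ => if d = '0' ∧ one' % 3 = 0 then true else q23aLoop rest one'

def question23a (L : String) : Bool := q23aLoop (q23aSkip L.toList) 0

-- ===== PORT B =====
-- hand port of Python's str.split('0') (single-character separator): exact on all inputs
def pySplit0 : List Char → List (List Char)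
  | [] => [[]]
  | c :: rest =>
    if c = '0' then [] :: pySplit0 rest
    else
      match pySplit0 rest with
      | s :: ss => (c :: s) :: ss
      | [] => [[c]]

def question23a_alt (L : String) : Bool :=
  -- segs = L.lstrip('1').split('0')[:-1]
  let segs := (pySplit0 (L.toList.dropWhile (· = '1'))).dropLast
  -- if segs and segs[0] == '': segs = segs[1:]
  let segs := match segs with
    | [] :: rest => rest
    | segs => segs
  -- any(len(s) % 3 == 0 for s in segs)
  segs.any (fun s => decide (s.length % 3 = 0))

-- ===== PRECONDITION & SPEC =====
def Spec_question23a (L : String) (out : Bool) : Prop := out = question23a_alt L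
instance (L : String) (out : Bool) : Decidable (Spec_question23a L out) := by unfold Spec_question23a; infer_instance

-- ===== CLAIM (what is proved, stated in full; the proofs are below) =====
def Claim_equal_question23a : Prop := ∀ (L : String), Dom_question23a L → Spec_question23a L (question23a L)

-- ===== LEMMAS AND PROOFS =====

theorem pySplit0_ne_nil (l : List Char) : pySplit0 l ≠ [] := by
  cases l with
  | nil => simp [pySplit0]
  | cons c rest =>
    simp only [pySplit0]
    split
    · simp
    · cases h : pySplit0 rest <;> simp

theorem split0_cons_zero (r : List Char) : pySplit0 ('0' :: r) = [] :: pySplit0 r := by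
  simp [pySplit0]

theorem split0_cons_ne (c : Char) (r : List Char) (hc : c ≠ '0') :
    pySplit0 (c :: r) = (c :: (pySplit0 r).headI) :: (pySplit0 r).tail := by
  simp only [pySplit0, if_neg hc]
  cases h : pySplit0 r with
  | nil => exact absurd h (pySplit0_ne_nil _)
  | cons a b => simp

-- the value of A's loop expressed through the split segments, with the counter generalized
def altCore' (S : List Char) (one : Nat) : Bool :=
  match (pySplit0 S).dropLast with
  | [] => false
  | seg :: rest =>
      (decide (seg ≠ []) && decide ((one + seg.length) % 3 = 0))
        || rest.any (fun s => decide (s.length % 3 = 0))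

theorem q23aLoop_eq_altCore' (S : List Char) : ∀ one, q23aLoop S one = altCore' S one := by
  induction S with
  | nil => intro one; simp [q23aLoop, altCore', pySplit0]
  | cons c rest ih =>
    intro one
    by_cases hc : c = '0'
    · subst hc
      cases rest with
      | nil => simp [q23aLoop, altCore', pySplit0]
      | cons d r' =>
        by_cases hd : d = '0'
        · subst hd
          have h1 : q23aLoop ('0' :: '0' :: r') one = true := by
            simp [q23aLoop]
          rw [h1]
          simp only [altCore', split0_cons_zero]
          cases h : pySplit0 r' with
          | nil => exact absurd h (pySplit0_ne_nil _)
          | cons a b => simp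
        · have hLHS : q23aLoop ('0' :: d :: r') one = q23aLoop (d :: r') 0 := by
            simp [q23aLoop, hd]
          rw [hLHS, ih 0]
          cases hr : pySplit0 r' with
          | nil => exact absurd hr (pySplit0_ne_nil _)
          | cons s ss =>
            have hsplitd : pySplit0 (d :: r') = (d :: s) :: ss := by
              rw [split0_cons_ne d r' hd, hr]
              rfl
            simp only [altCore', split0_cons_zero, hsplitd]
            cases ss with
            | nil => simp
            | cons t ts =>
              simp
              rfl
    · -- c ≠ '0'
      cases rest with
      | nil =>
        have h1 : q23aLoop [c] one = false := by simp [q23aLoop]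
        rw [h1]
        simp [altCore', pySplit0, hc]
      | cons d r' =>
        by_cases hd : d = '0'
        · subst hd
          have hsplitc : pySplit0 (c :: '0' :: r') = [c] :: pySplit0 r' := by
            rw [split0_cons_ne c _ hc, split0_cons_zero]
            rfl
          by_cases hone : (one + 1) % 3 = 0
          · have h1 : q23aLoop (c :: '0' :: r') one = true := by
              simp [q23aLoop, hc, hone]
            rw [h1]
            simp only [altCore', hsplitc]
            cases h : pySplit0 r' with
            | nil => exact absurd h (pySplit0_ne_nil _)
            | cons a b => simp [hone]
          · have hLHS : q23aLoop (c :: '0' :: r') one = q23aLoop ('0' :: r') (one + 1) := by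
              simp [q23aLoop, hc, hone]
            rw [hLHS, ih]
            simp only [altCore', hsplitc, split0_cons_zero]
            cases h : pySplit0 r' with
            | nil => exact absurd h (pySplit0_ne_nil _)
            | cons a b =>
              cases b with
              | nil => simp [hone]
              | cons t ts => simp [hone]
        · have hLHS : q23aLoop (c :: d :: r') one = q23aLoop (d :: r') (one + 1) := by
            simp [q23aLoop, hc, hd]
          rw [hLHS, ih]
          cases hr : pySplit0 r' with
          | nil => exact absurd hr (pySplit0_ne_nil _)
          | cons s ss =>
            have hsplitd : pySplit0 (d :: r') = (d :: s) :: ss := by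
              rw [split0_cons_ne d r' hd, hr]
              rfl
            have hsplitc : pySplit0 (c :: d :: r') = (c :: d :: s) :: ss := by
              rw [split0_cons_ne c _ hc, hsplitd]
              rfl
            cases ss with
            | nil => simp [altCore', hsplitc, hsplitd]
            | cons t ts =>
              have harith : (one + 1 + (s.length + 1)) % 3 = (one + (s.length + 1 + 1)) % 3 := by
                omega
              simp only [altCore', hsplitc, hsplitd]
              simp [harith]
              rfl

theorem altCore'_zero (S : List Char) :
    altCore' S 0 =
      (match (pySplit0 S).dropLast with
        | [] :: rest => rest
        | segs => segs).any (fun s => decide (s.length % 3 = 0)) := by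
  unfold altCore'
  cases h : (pySplit0 S).dropLast with
  | nil => simp
  | cons seg rest =>
    cases seg with
    | nil => simp
    | cons a b => simp; rfl

theorem q23aSkip_eq_dropWhile (l : List Char) : q23aSkip l = l.dropWhile (· = '1') := by
  induction l with
  | nil => rfl
  | cons c rest ih =>
    by_cases hc : c = '1' <;> simp [q23aSkip, List.dropWhile, hc, ih]

-- ===== VERDICT (by name: the statement is the Claim_ definition above) =====
theorem question23a_spec : Claim_equal_question23a := by
  intro L _
  unfold Spec_question23a question23a question23a_alt
  rw [q23aSkip_eq_dropWhile, q23aLoop_eq_altCore', altCore'_zero]
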